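-- pv_equiv track=rewrite | github.com/harrystech/arthur-redshift-etl | python/etl/extract/extractor.py | suggest_best_partition_number
-- ===== SOURCE A (Python) =====
-- def suggest_best_partition_number(table_size: int) -> int:
--     """
--     Suggest number of partitions based on the table size (in bytes).  Number of partitions is always
--     a factor of 2.
--
--     The number of partitions is based on:
--       Small tables (<= 10M): Use partitions around 1MB.
--       Medium tables (<= 1G): Use partitions around 10MB.
--       Huge tables (> 1G): Use partitions around 20MB.
--
--     >>> suggest_best_partition_number(100)
--     1
--     >>> suggest_best_partition_number(1048576)
--     1
--     >>> suggest_best_partition_number(3 * 1048576)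
--     2
--     >>> suggest_best_partition_number(10 * 1048576)
--     8
--     >>> suggest_best_partition_number(100 * 1048576)
--     8
--     >>> suggest_best_partition_number(200 * 1048576)
--     16
--     >>> suggest_best_partition_number(2000 * 1048576)
--     64
--     """
--     meg = 1024 * 1024
--     if table_size <= 10 * meg:
--         target = 1 * meg
--     elif table_size <= 1024 * meg:
--         target = 10 * meg
--     else:
--         target = 20 * meg
--
--     num_partitions = 1
--     partition_size = table_size
--     # Keep the partition sizes above the target value:
--     while partition_size >= target * 2 and num_partitions < 1024:
--         num_partitions *= 2
--         partition_size //= 2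
--
--     return num_partitions
-- ===== SOURCE B (Python) =====
-- def suggest_best_partition_number(table_size: int) -> int:
--     """Closed-form: partition-count exponent from bit_length of table_size // target, capped at 1024."""
--     meg = 1024 * 1024
--     if table_size <= 10 * meg:
--         target = 1 * meg
--     elif table_size <= 1024 * meg:
--         target = 10 * meg
--     else:
--         target = 20 * meg
--
--     r = table_size // target
--     count = r.bit_length() - 1 if r >= 1 else 0
--     return min(1024, 1 << count)
-- ===== Notes on version B (the rewrite author's own statement) =====
-- stated objective: idiomatic
-- what changed: Replaces the halving while-loop with a closed-form computation: the partition-count exponent is read off the bit length of the quotient of table size by the target partition size, then capped.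
import Mathlib
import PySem

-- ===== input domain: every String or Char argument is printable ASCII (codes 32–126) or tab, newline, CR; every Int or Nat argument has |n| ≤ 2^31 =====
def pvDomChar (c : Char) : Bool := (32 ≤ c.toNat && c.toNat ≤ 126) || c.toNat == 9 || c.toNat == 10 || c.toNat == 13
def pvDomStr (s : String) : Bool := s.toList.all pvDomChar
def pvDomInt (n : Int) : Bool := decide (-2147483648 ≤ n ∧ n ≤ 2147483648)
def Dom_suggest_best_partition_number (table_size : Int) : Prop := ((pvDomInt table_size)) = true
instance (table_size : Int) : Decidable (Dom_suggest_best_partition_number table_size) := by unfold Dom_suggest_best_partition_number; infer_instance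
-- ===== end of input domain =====

-- B replaces A's halving while-loop by a closed-form bit_length computation of the same return value.

-- ===== PORT A =====
-- the while-loop of A; the positivity hypothesis on target (true at every call site) is for termination only
def loopA (target : Int) (ht : 1 ≤ target) (num_partitions partition_size : Int) : Int :=
  if h : target * 2 ≤ partition_size ∧ num_partitions < 1024 then
    loopA target ht (num_partitions * 2) (PySem.Int.floordiv partition_size 2)
  else num_partitions
termination_by partition_size.toNat
decreasing_by
  rw [PySem.Int.floordiv_eq_ediv_of_pos (by norm_num)]
  omega

def suggest_best_partition_number (table_size : Int) : Int :=
  let meg : Int := 1024 * 1024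
  let target : {t : Int // 1 ≤ t} :=
    if table_size ≤ 10 * meg then ⟨1 * meg, by norm_num⟩
    else if table_size ≤ 1024 * meg then ⟨10 * meg, by norm_num⟩
    else ⟨20 * meg, by norm_num⟩
  loopA target.1 target.2 1 table_size

-- ===== PORT B =====
def suggest_best_partition_number_alt (table_size : Int) : Int :=
  let meg : Int := 1024 * 1024
  let target : Int :=
    if table_size ≤ 10 * meg then 1 * meg
    else if table_size ≤ 1024 * meg then 10 * meg
    else 20 * meg
  let r : Int := PySem.Int.floordiv table_size target
  let count : Nat := if 1 ≤ r then PySem.Int.bitLength r - 1 else 0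
  min 1024 ((1 : Int) <<< count)

-- ===== PRECONDITION & SPEC =====
def Spec_suggest_best_partition_number (table_size : Int) (out : Int) : Prop := out = suggest_best_partition_number_alt table_size
instance (table_size : Int) (out : Int) : Decidable (Spec_suggest_best_partition_number table_size out) := by unfold Spec_suggest_best_partition_number; infer_instance

-- ===== CLAIM (what is proved, stated in full; the proofs are below) =====
def Claim_equal_suggest_best_partition_number : Prop := ∀ (table_size : Int), Dom_suggest_best_partition_number table_size → Spec_suggest_best_partition_number table_size (suggest_best_partition_number table_size)

-- ===== LEMMAS AND PROOFS =====

-- B's count expression, as a function of target and table size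
def cnt (t ps : Int) : Nat :=
  if 1 ≤ PySem.Int.floordiv ps t then PySem.Int.bitLength (PySem.Int.floordiv ps t) - 1 else 0

lemma bitLength_pos_of_pos {n : Int} (hn : 1 ≤ n) : 1 ≤ PySem.Int.bitLength n := by
  by_contra h
  have h0 : PySem.Int.bitLength n = 0 := by omega
  have := PySem.Int.lt_two_pow_bitLength n
  rw [h0] at this
  simp at this
  omega

lemma floordiv_floordiv (ps t : Int) (ht : 0 < t) :
    PySem.Int.floordiv (PySem.Int.floordiv ps 2) t
      = PySem.Int.floordiv (PySem.Int.floordiv ps t) 2 := by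
  rw [PySem.Int.floordiv_eq_ediv_of_pos (by norm_num : (0:Int) < 2),
      PySem.Int.floordiv_eq_ediv_of_pos ht,
      PySem.Int.floordiv_eq_ediv_of_pos ht,
      PySem.Int.floordiv_eq_ediv_of_pos (by norm_num : (0:Int) < 2)]
  have a1 : ps / 2 / t = ps / (2 * t) := Int.ediv_ediv_of_nonneg (by norm_num)
  have a2 : ps / t / 2 = ps / (t * 2) := Int.ediv_ediv_of_nonneg (by omega)
  rw [a1, a2, mul_comm]

lemma cnt_base (t ps : Int) (ht : 1 ≤ t) (h : ¬ t * 2 ≤ ps) : cnt t ps = 0 := by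
  have hr : PySem.Int.floordiv ps t < 2 := by
    rw [PySem.Int.floordiv_lt_iff_lt_mul (by omega)]; omega
  unfold cnt
  split
  · rename_i h1
    have : PySem.Int.floordiv ps t = 1 := by omega
    rw [this]; decide
  · rfl

lemma cnt_step (t ps : Int) (ht : 1 ≤ t) (h : t * 2 ≤ ps) :
    cnt t ps = cnt t (PySem.Int.floordiv ps 2) + 1 := by
  have hr2 : 2 ≤ PySem.Int.floordiv ps t := by
    rw [PySem.Int.le_floordiv_iff_mul_le (by omega)]; omega
  have hcomp := floordiv_floordiv ps t (by omega)
  have hr21 : 1 ≤ PySem.Int.floordiv (PySem.Int.floordiv ps t) 2 := by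
    rw [PySem.Int.le_floordiv_iff_mul_le (by norm_num)]; omega
  have hbl : PySem.Int.bitLength (PySem.Int.floordiv ps t)
      = PySem.Int.bitLength (PySem.Int.floordiv (PySem.Int.floordiv ps t) 2) + 1 :=
    PySem.Int.bitLength_of_pos (by omega)
  have hb1 := bitLength_pos_of_pos hr21
  unfold cnt
  rw [hcomp]
  rw [if_pos (by omega : (1:Int) ≤ PySem.Int.floordiv ps t), if_pos hr21, hbl]
  omega

lemma loopA_eq (t : Int) (ht : 1 ≤ t) (np ps : Int) :
    ∀ i : Nat, i ≤ 10 → np = 2 ^ i →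
      loopA t ht np ps = 2 ^ (i + min (10 - i) (cnt t ps)) := by
  induction np, ps using loopA.induct t ht with
  | case1 np ps h ih =>
    intro i hi hnp
    have hlt : i < 10 := by
      by_contra hc
      have : i = 10 := by omega
      subst this
      have : np = 1024 := by rw [hnp]; norm_num
      omega
    rw [loopA, dif_pos h]
    rw [ih (i + 1) (by omega) (by rw [hnp]; ring)]
    have hc := cnt_step t ps ht h.1
    congr 1
    omega
  | case2 np ps h =>
    intro i hi hnp
    rw [loopA, dif_neg h]
    rcases not_and_or.mp h with h1 | h1
    · rw [cnt_base t ps ht h1, hnp]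
      congr 1; omega
    · have h10 : (1024:Int) ≤ np := by omega
      have hi10 : i = 10 := by
        by_contra hc
        have hlt : i < 10 := by omega
        have hp : (2:Int)^i < 2^10 := pow_lt_pow_right₀ (by norm_num : (1:Int) < 2) hlt
        have h1024 : ((2:Int))^10 = 1024 := by norm_num
        rw [h1024, ← hnp] at hp
        omega
      subst hi10
      rw [hnp]
      congr 1

lemma shift_min (c : Nat) : min 1024 ((1 : Int) <<< c) = 2 ^ (min 10 c) := by
  rw [Int.shiftLeft_eq, one_mul]
  by_cases h : c ≤ 10
  · rw [min_eq_right h, min_eq_right]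
    exact pow_le_pow_right₀ (by norm_num) h
  · have h2 : (1024:Int) ≤ 2 ^ c := by
      calc (1024:Int) = 2 ^ 10 := by norm_num
        _ ≤ 2 ^ c := pow_le_pow_right₀ (by norm_num) (by omega)
    rw [min_eq_left h2, min_eq_left (by omega)]; norm_num

lemma main_eq (t : Int) (ht : 1 ≤ t) (ts : Int) :
    loopA t ht 1 ts
      = min 1024 ((1:Int) <<< (if 1 ≤ PySem.Int.floordiv ts t then PySem.Int.bitLength (PySem.Int.floordiv ts t) - 1 else 0)) := by
  rw [loopA_eq t ht 1 ts 0 (by omega) (by norm_num), shift_min]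
  simp [cnt]

-- ===== VERDICT (by name: the statement is the Claim_ definition above) =====
theorem suggest_best_partition_number_spec : Claim_equal_suggest_best_partition_number := by
  intro ts _
  unfold Spec_suggest_best_partition_number suggest_best_partition_number suggest_best_partition_number_alt
  by_cases h1 : ts ≤ 10 * (1024 * 1024)
  · simp only [h1, if_pos]
    exact main_eq _ _ ts
  · by_cases h2 : ts ≤ 1024 * (1024 * 1024)
    · simp only [h1, h2, if_neg, if_pos, not_false_iff]
      exact main_eq _ _ ts
    · simp only [h1, h2, if_neg, not_false_iff]
      exact main_eq _ _ ts
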